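-- pv_equiv track=rewrite | github.com/Morrolan/surrealism | surrealism/__init__backup.py | __check_spaces
-- ===== SOURCE A (Python) =====
-- def __check_spaces(_sentence):
--     """
--     Here we check to see that we have the correct number of spaces in the correct locations.
--
--     :param _sentence:
--     :return:
--     """
--     # We have to run the process multiple times:
--     #   Once to search for all spaces, and check if there are adjoining spaces;
--     #   The second time to check for 2 spaces after sentence-ending characters such as . and ! and ?
--
--     if _sentence is not None:
--
--         words = _sentence.split()
--
--         new_sentence = ''
--
--         for (i, word) in enumerate(words):
--
--             if word[-1] in set('.!?'):
--                 word += ' '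
--             new_word = ''.join(word)
--             new_sentence += ' ' + new_word
--
--         # remove any trailing whitespace
--         new_sentence = new_sentence.lstrip()
--         new_sentence = new_sentence.rstrip()
--
--         return new_sentence
-- ===== SOURCE B (Python) =====
-- def __check_spaces(_sentence):
--     """Normalize spacing; insert a second space after sentence-ending punctuation.
--
--     Single character scan over the space-joined words instead of a
--     per-word accumulate-and-strip loop."""
--     if _sentence is None:
--         return None
--     s = ' '.join(_sentence.split())
--     out = []
--     for cur, nxt in zip(s, s[1:]):
--         out.append(cur)
--         if nxt == ' ' and (cur == '.' or cur == '!' or cur == '?'):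
--             out.append(' ')
--     return ''.join(out) + s[-1:]
-- ===== Notes on version B (the rewrite author's own statement) =====
-- stated objective: alternative
-- what changed: Replaces A's per-word enumerate loop with punctuation test on each word's last character plus final lstrip/rstrip by one character scan of the space-joined words that doubles the space after '.', '!' or '?' when the next character is a space.
import Mathlib
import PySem

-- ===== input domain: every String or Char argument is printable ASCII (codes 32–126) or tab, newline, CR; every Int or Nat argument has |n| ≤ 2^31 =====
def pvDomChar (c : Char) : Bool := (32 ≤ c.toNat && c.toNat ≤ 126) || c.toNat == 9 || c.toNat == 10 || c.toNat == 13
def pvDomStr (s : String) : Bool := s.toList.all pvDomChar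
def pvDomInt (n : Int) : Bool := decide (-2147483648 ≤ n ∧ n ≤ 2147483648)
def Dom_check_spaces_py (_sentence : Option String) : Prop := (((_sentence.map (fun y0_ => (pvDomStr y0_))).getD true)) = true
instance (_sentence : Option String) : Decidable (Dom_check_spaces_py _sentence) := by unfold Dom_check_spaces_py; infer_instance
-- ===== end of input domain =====

-- B replaces A's per-word accumulate/strip loop by one character scan of the space-joined
-- words that doubles the space after '.', '!' or '?' (alternative decomposition, same cost).

-- ===== PORT A =====
def pvPunct : List Char := ['.', '!', '?']

-- literal port of A's body on List Char; `word[-1]` is pyGet? word (-1) (split₀ words are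
-- nonempty, so the `none` branch — Python's IndexError — is unreachable), `''.join(word)`
-- is join [] over the singleton chars.
def pvACore (cs : List Char) : List Char :=
  let words := PySem.Chars.split₀ cs
  let new_sentence := (PySem.List.enumerate words 0).foldl
    (fun new_sentence iw =>
      let word := iw.2
      let word := if (match PySem.List.pyGet? word (-1) with
                      | some c => pvPunct.contains c
                      | none => false)
                  then word ++ [' '] else word
      let new_word := PySem.Chars.join [] (word.map (fun c => [c]))
      new_sentence ++ [' '] ++ new_word) []
  PySem.Chars.rstrip (PySem.Chars.lstrip new_sentence)

def check_spaces_py (_sentence : Option String) : Option String :=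
  match _sentence with
  | none => none
  | some s => some (String.ofList (pvACore s.toList))

-- ===== PORT B =====
-- literal port of Source B on List Char: s[1:] and s[-1:] are PySem slices.
def pvBCore (cs : List Char) : List Char :=
  let s := PySem.Chars.join [' '] (PySem.Chars.split₀ cs)
  let out := (s.zip (PySem.List.slice s (some 1) none)).foldl
    (fun out p =>
      let out := out ++ [p.1]
      if p.2 = ' ' ∧ (p.1 = '.' ∨ p.1 = '!' ∨ p.1 = '?') then out ++ [' '] else out) []
  out ++ PySem.List.slice s (some (-1)) none

def check_spaces_py_alt (_sentence : Option String) : Option String :=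
  match _sentence with
  | none => none
  | some s => some (String.ofList (pvBCore s.toList))

-- ===== PRECONDITION & SPEC =====
def Spec_check_spaces_py (_sentence : Option String) (out : Option String) : Prop := out = check_spaces_py_alt _sentence
instance (_sentence : Option String) (out : Option String) : Decidable (Spec_check_spaces_py _sentence out) := by unfold Spec_check_spaces_py; infer_instance

-- ===== CLAIM (what is proved, stated in full; the proofs are below) =====
def Claim_equal_check_spaces_py : Prop := ∀ (_sentence : Option String), Dom_check_spaces_py _sentence → Spec_check_spaces_py _sentence (check_spaces_py _sentence)

-- ===== LEMMAS AND PROOFS =====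

-- proof-side vocabulary
def pvEndsPunct (w : List Char) : Bool :=
  match w.getLast? with
  | some c => pvPunct.contains c
  | none => false

def pvSuf (w : List Char) : List Char := if pvEndsPunct w then [' '] else []

-- the common normal form: words joined by one space, with an extra space after a
-- punctuation-ended word that is not the last one
def pvG : List (List Char) → List Char
  | [] => []
  | [w] => w
  | w :: v :: ws => w ++ pvSuf w ++ (' ' :: pvG (v :: ws))

-- B's scan as a structural recursion on consecutive pairs
def pvScan : List Char → List Char
  | [] => []
  | [c] => [c]
  | c :: d :: t =>
      c :: ((if d = ' ' ∧ (c = '.' ∨ c = '!' ∨ c = '?') then [' '] else []) ++ pvScan (d :: t))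

def pvOK (w : List Char) : Prop := w ≠ [] ∧ ∀ c ∈ w, PySem.Chars.isspace c = false

-- every word produced by split() is nonempty and whitespace-free
theorem pvSplit₀_go_ok (rest : List Char) :
    ∀ (cur : List Char) (acc : List (List Char)),
      (∀ w ∈ acc, pvOK w) → (∀ c ∈ cur, PySem.Chars.isspace c = false) →
      ∀ w ∈ PySem.Chars.split₀.go rest cur acc, pvOK w := by
  induction rest with
  | nil =>
    intro cur acc hacc hcur w hw
    by_cases hc : cur = []
    · subst hc; simp [PySem.Chars.split₀.go] at hw
      exact hacc w hw
    · simp [PySem.Chars.split₀.go, hc] at hw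
      rcases hw with hw | hw
      · exact hacc w hw
      · subst hw
        exact ⟨by simpa using hc, by intro c hcm; exact hcur c (List.mem_reverse.mp hcm)⟩
  | cons c rest ih =>
    intro cur acc hacc hcur w hw
    rw [PySem.Chars.split₀.go] at hw
    by_cases hs : PySem.Chars.isspace c = true
    · simp only [hs, if_true] at hw
      by_cases hc : cur = []
      · subst hc; simp at hw
        exact ih [] acc hacc (by simp) w hw
      · simp [hc] at hw
        refine ih [] (cur.reverse :: acc) ?_ (by simp) w hw
        intro v hv
        rcases List.mem_cons.mp hv with hv | hv
        · subst hv
          exact ⟨by simpa using hc, by intro d hd; exact hcur d (List.mem_reverse.mp hd)⟩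
        · exact hacc v hv
    · rw [if_neg hs] at hw
      refine ih (c :: cur) acc hacc ?_ w hw
      intro d hd
      rcases List.mem_cons.mp hd with hd | hd
      · subst hd; simpa using hs
      · exact hcur d hd

theorem pvSplit₀_ok (cs : List Char) : ∀ w ∈ PySem.Chars.split₀ cs, pvOK w := by
  intro w hw
  exact pvSplit₀_go_ok cs [] [] (by simp) (by simp) w hw

-- `word[-1]` is the last character
theorem pvPyGet_neg_one (w : List Char) : PySem.List.pyGet? w (-1) = w.getLast? := by
  cases w with
  | nil => rfl
  | cons c t => simp [PySem.List.pyGet?, PySem.List.pyIdx?, List.getLast?_eq_getElem?]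

-- A's loop as a flatMap
def pvHA (w : List Char) : List Char := ' ' :: (w ++ pvSuf w)

theorem pvAFold (ws : List (List Char)) (start : Int) (acc : List Char) :
    (PySem.List.enumerate ws start).foldl (fun new_sentence iw =>
      let word := iw.2
      let word := if (match PySem.List.pyGet? word (-1) with
                      | some c => pvPunct.contains c
                      | none => false)
                  then word ++ [' '] else word
      let new_word := PySem.Chars.join [] (word.map (fun c => [c]))
      new_sentence ++ [' '] ++ new_word) acc
    = acc ++ ws.flatMap pvHA := by
  induction ws generalizing start acc with
  | nil => simp [PySem.List.enumerate_nil]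
  | cons w ws ih =>
    rw [PySem.List.enumerate_cons, List.foldl_cons, ih]
    simp only [List.flatMap_cons]
    show acc ++ [' '] ++
        PySem.Chars.join [] (List.map (fun c => [c])
          (if (match PySem.List.pyGet? w (-1) with
               | some c => pvPunct.contains c
               | none => false) = true then w ++ [' '] else w)) ++
        List.flatMap pvHA ws
      = acc ++ (pvHA w ++ List.flatMap pvHA ws)
    have hcond : (match PySem.List.pyGet? w (-1) with
        | some c => pvPunct.contains c
        | none => false) = pvEndsPunct w := by
      rw [pvPyGet_neg_one]; unfold pvEndsPunct; rfl
    rw [hcond]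
    unfold pvHA pvSuf
    cases h : pvEndsPunct w
    · rw [if_neg (by simp), if_neg (by simp), PySem.Chars.join_nil_singletons w]
      simp
    · rw [if_pos (by simp), if_pos (by simp), PySem.Chars.join_nil_singletons (w ++ [' '])]
      simp

-- dropWhile does not touch a block starting with a non-space character
theorem pvDropNonspace (x z : List Char) (hx : x ≠ [])
    (h : ∀ c ∈ x, PySem.Chars.isspace c = false) :
    List.dropWhile PySem.Chars.isspace (x ++ z) = x ++ z := by
  cases x with
  | nil => exact absurd rfl hx
  | cons c t => simp [h c (List.mem_cons_self)]

-- the right-strip of A's loop output, seen from the reversed side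
theorem pvSufCases (w : List Char) : pvSuf w = [] ∨ pvSuf w = [' '] := by
  unfold pvSuf; split <;> simp

theorem pvDropCore (w z : List Char) (hwne : w ≠ [])
    (hwns : ∀ c ∈ w, PySem.Chars.isspace c = false) :
    List.dropWhile PySem.Chars.isspace ((pvSuf w).reverse ++ (w.reverse ++ z))
      = w.reverse ++ z := by
  have hwr : ∀ c ∈ w.reverse, PySem.Chars.isspace c = false := by
    intro c hc; exact hwns c (List.mem_reverse.mp hc)
  have hwrne : w.reverse ≠ [] := by simpa using hwne
  rcases pvSufCases w with hsf | hsf <;> rw [hsf]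
  · rw [List.reverse_nil, List.nil_append]
    exact pvDropNonspace w.reverse z hwrne hwr
  · rw [List.reverse_singleton, List.singleton_append, List.dropWhile_cons,
      if_pos (by decide)]
    exact pvDropNonspace w.reverse z hwrne hwr

theorem pvDropRev (ws : List (List Char)) (hok : ∀ w ∈ ws, pvOK w) (hne : ws ≠ []) :
    List.dropWhile PySem.Chars.isspace (ws.flatMap pvHA).reverse
      = (pvG ws).reverse ++ [' '] := by
  induction ws with
  | nil => exact absurd rfl hne
  | cons w ws ih =>
    obtain ⟨hwne, hwns⟩ : pvOK w := hok w (List.mem_cons_self)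
    cases ws with
    | nil =>
      have hrev : ((w :: ([] : List (List Char))).flatMap pvHA).reverse
          = (pvSuf w).reverse ++ (w.reverse ++ [' ']) := by simp [pvHA]
      rw [hrev, pvDropCore w [' '] hwne hwns]
      simp [pvG]
    | cons v vs =>
      have hrest := ih (by intro u hu; exact hok u (List.mem_cons_of_mem _ hu)) (by simp)
      have hrev : ((w :: v :: vs).flatMap pvHA).reverse
          = ((v :: vs).flatMap pvHA).reverse ++ ((pvSuf w).reverse ++ (w.reverse ++ [' '])) := by
        simp [pvHA]
      rw [hrev, List.dropWhile_append, hrest, if_neg (by simp)]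
      simp [pvG]

-- A's value on a word list
theorem pvAChar (ws : List (List Char)) (hok : ∀ w ∈ ws, pvOK w) :
    PySem.Chars.rstrip (PySem.Chars.lstrip (ws.flatMap pvHA)) = pvG ws := by
  cases ws with
  | nil => simp [PySem.Chars.lstrip, PySem.Chars.rstrip, pvG]
  | cons w ws =>
    obtain ⟨hwne, hwns⟩ : pvOK w := hok w (List.mem_cons_self)
    have hstep : PySem.Chars.lstrip ((w :: ws).flatMap pvHA)
        = w ++ (pvSuf w ++ ws.flatMap pvHA) := by
      have h1 : (w :: ws).flatMap pvHA = ' ' :: (w ++ (pvSuf w ++ ws.flatMap pvHA)) := by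
        simp [pvHA]
      rw [PySem.Chars.lstrip, h1, List.dropWhile_cons, if_pos (by decide)]
      exact pvDropNonspace w _ hwne hwns
    rw [hstep, PySem.Chars.rstrip]
    cases ws with
    | nil =>
      have hrev : (w ++ (pvSuf w ++ ([] : List (List Char)).flatMap pvHA)).reverse
          = (pvSuf w).reverse ++ (w.reverse ++ []) := by simp
      rw [hrev, pvDropCore w [] hwne hwns]
      simp [pvG]
    | cons v vs =>
      have hrest := pvDropRev (v :: vs)
        (by intro u hu; exact hok u (List.mem_cons_of_mem _ hu)) (by simp)
      have hrev : (w ++ (pvSuf w ++ (v :: vs).flatMap pvHA)).reverse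
          = ((v :: vs).flatMap pvHA).reverse ++ ((pvSuf w).reverse ++ w.reverse) := by
        simp
      rw [hrev, List.dropWhile_append, hrest, if_neg (by simp)]
      simp [pvG]

-- B's loop as a flatMap
theorem pvBFold (ps : List (Char × Char)) (acc : List Char) :
    ps.foldl (fun out p =>
      let out := out ++ [p.1]
      if p.2 = ' ' ∧ (p.1 = '.' ∨ p.1 = '!' ∨ p.1 = '?') then out ++ [' '] else out) acc
    = acc ++ ps.flatMap (fun p =>
        p.1 :: (if p.2 = ' ' ∧ (p.1 = '.' ∨ p.1 = '!' ∨ p.1 = '?') then [' '] else [])) := by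
  induction ps generalizing acc with
  | nil => simp
  | cons p ps ih =>
    simp only [List.foldl_cons, List.flatMap_cons, ih]
    by_cases h : p.2 = ' ' ∧ (p.1 = '.' ∨ p.1 = '!' ∨ p.1 = '?') <;> simp [h]

theorem pvSliceOne (s : List Char) : PySem.List.slice s (some 1) none = s.tail := by
  cases s with
  | nil => rfl
  | cons c t => simp [PySem.List.slice, PySem.List.clampIdx]

theorem pvSliceLast (s : List Char) (h : s ≠ []) :
    PySem.List.slice s (some (-1)) none = [s.getLast h] := by
  have h1 : 1 ≤ s.length := List.length_pos_iff.mpr h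
  simp only [PySem.List.slice, PySem.List.clampIdx]
  norm_num
  rw [if_neg (by omega)]
  have ha : ((s.length : Int) + -1).toNat = s.length - 1 := by omega
  rw [ha, show s.length - (s.length - 1) = 1 by omega]
  rw [List.drop_length_sub_one h]
  rfl

-- zip-with-next flatMap plus the final character is the two-ahead scan
theorem pvZipScan (s : List Char) :
    ((s.zip s.tail).flatMap (fun p =>
        p.1 :: (if p.2 = ' ' ∧ (p.1 = '.' ∨ p.1 = '!' ∨ p.1 = '?') then [' '] else [])))
      ++ PySem.List.slice s (some (-1)) none = pvScan s := by
  induction s using pvScan.induct with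
  | case1 => rfl
  | case2 c => simp [pvScan, PySem.List.slice, PySem.List.clampIdx]
  | case3 c d t ih =>
    have hlast : PySem.List.slice (c :: d :: t) (some (-1)) none
        = PySem.List.slice (d :: t) (some (-1)) none := by
      rw [pvSliceLast _ (by simp), pvSliceLast _ (by simp), List.getLast_cons]
    simp only [List.tail_cons, List.zip_cons_cons, List.flatMap_cons] at *
    rw [hlast, pvScan]
    rw [List.append_assoc, ih]
    simp

theorem pvScanSpaceCons (r : List Char) : pvScan (' ' :: r) = ' ' :: pvScan r := by
  cases r with
  | nil => rfl
  | cons d t => simp [pvScan]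

theorem pvScanNoSpace (w : List Char) (h : ∀ c ∈ w, PySem.Chars.isspace c = false) :
    pvScan w = w := by
  induction w using pvScan.induct with
  | case1 => rfl
  | case2 c => rfl
  | case3 c d t ih =>
    have hd : d ≠ ' ' := by
      intro hdeq
      have := h d (by simp [hdeq]); rw [hdeq] at this; exact absurd this (by decide)
    rw [pvScan, if_neg (by tauto)]
    simp only [List.nil_append]
    rw [ih (by intro x hx; exact h x (List.mem_cons_of_mem _ hx))]

theorem pvContains (c : Char) : (pvPunct.contains c = true) ↔ (c = '.' ∨ c = '!' ∨ c = '?') := by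
  simp [pvPunct]

theorem pvScanChain (w : List Char) (hw : pvOK w) (r : List Char) :
    pvScan (w ++ ' ' :: r) = w ++ pvSuf w ++ ' ' :: pvScan r := by
  obtain ⟨hne, hns⟩ := hw
  induction w using pvScan.induct with
  | case1 => exact absurd rfl hne
  | case2 c =>
    have hsuf : pvSuf [c] = if c = '.' ∨ c = '!' ∨ c = '?' then [' '] else [] := by
      unfold pvSuf pvEndsPunct
      simp only [List.getLast?_singleton]
      by_cases hp : c = '.' ∨ c = '!' ∨ c = '?'
      · rw [if_pos ((pvContains c).mpr hp), if_pos hp]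
      · rw [if_neg (fun h => hp ((pvContains c).mp h)), if_neg hp]
    rw [List.singleton_append, pvScan, pvScanSpaceCons, hsuf]
    by_cases hp : c = '.' ∨ c = '!' ∨ c = '?'
    · rw [if_pos ⟨rfl, hp⟩, if_pos hp]
      simp
    · rw [if_neg (by tauto), if_neg hp]
      simp
  | case3 c d t ih =>
    have hd : d ≠ ' ' := by
      intro hdeq
      have := hns d (by simp [hdeq]); rw [hdeq] at this; exact absurd this (by decide)
    show pvScan (c :: d :: (t ++ ' ' :: r)) = _
    rw [pvScan, if_neg (by tauto)]
    rw [show d :: (t ++ ' ' :: r) = (d :: t) ++ ' ' :: r from rfl]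
    rw [ih (by simp) (by intro x hx; exact hns x (List.mem_cons_of_mem _ hx))]
    have hsuf : pvSuf (c :: d :: t) = pvSuf (d :: t) := by
      unfold pvSuf pvEndsPunct; rw [List.getLast?_cons_cons]
    simp [hsuf]

theorem pvScanJoin (ws : List (List Char)) (hok : ∀ w ∈ ws, pvOK w) :
    pvScan (PySem.Chars.join [' '] ws) = pvG ws := by
  cases ws with
  | nil => simp [PySem.Chars.join_nil, pvScan, pvG]
  | cons w ws =>
    induction ws generalizing w with
    | nil =>
      rw [PySem.Chars.join_singleton]
      exact pvScanNoSpace w (hok w (List.mem_cons_self)).2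
    | cons v vs ih =>
      rw [PySem.Chars.join_cons_cons]
      rw [show w ++ [' '] ++ PySem.Chars.join [' '] (v :: vs)
            = w ++ ' ' :: PySem.Chars.join [' '] (v :: vs) by simp]
      rw [pvScanChain w (hok w (List.mem_cons_self)) _]
      rw [ih v (by intro u hu; exact hok u (List.mem_cons_of_mem _ hu))]
      simp [pvG]

theorem pvCoreEq (cs : List Char) : pvACore cs = pvBCore cs := by
  rw [show pvACore cs = PySem.Chars.rstrip (PySem.Chars.lstrip
      ((PySem.List.enumerate (PySem.Chars.split₀ cs) 0).foldl
        (fun new_sentence iw =>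
          let word := iw.2
          let word := if (match PySem.List.pyGet? word (-1) with
                          | some c => pvPunct.contains c
                          | none => false)
                      then word ++ [' '] else word
          let new_word := PySem.Chars.join [] (word.map (fun c => [c]))
          new_sentence ++ [' '] ++ new_word) [])) from rfl]
  rw [pvAFold, List.nil_append, pvAChar _ (pvSplit₀_ok cs)]
  rw [show pvBCore cs =
      (((PySem.Chars.join [' '] (PySem.Chars.split₀ cs)).zip
          (PySem.List.slice (PySem.Chars.join [' '] (PySem.Chars.split₀ cs)) (some 1) none)).foldl
        (fun out p =>
          let out := out ++ [p.1]
          if p.2 = ' ' ∧ (p.1 = '.' ∨ p.1 = '!' ∨ p.1 = '?') then out ++ [' '] else out) [])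
      ++ PySem.List.slice (PySem.Chars.join [' '] (PySem.Chars.split₀ cs)) (some (-1)) none from rfl]
  rw [pvSliceOne, pvBFold, List.nil_append, pvZipScan]
  rw [pvScanJoin _ (pvSplit₀_ok cs)]

-- ===== VERDICT (by name: the statement is the Claim_ definition above) =====
theorem check_spaces_py_spec : Claim_equal_check_spaces_py := by
  intro s _
  unfold Spec_check_spaces_py
  cases s with
  | none => rfl
  | some s => simp [check_spaces_py, check_spaces_py_alt, pvCoreEq]
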